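-- pv_equiv track=rewrite | github.com/nthiyag/Uni-Projects | PHY294/Franck-Hertz/Franck-Hertz_Data_Processing.py | find_peak_idx
-- ===== SOURCE A (Python) =====
-- def find_peak_idx(data, window_len=8, err_patience=2):
--     peaks = []
--     for i in range(window_len, len(data)-window_len):
--         window_up = data[i-window_len:i+1]
--         window_down = data[i:i+window_len+1]
--
--         if sum([window_up[j] < window_up[j+1] for j in range(len(window_up)-1)]) >= len(window_up)-1 - err_patience and sum([window_down[j] > window_down[j+1] for j in range(len(window_up)-1)]) >= len(window_up)-1 - err_patience:
--             peaks.append(i)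
--
--     return peaks
-- ===== SOURCE B (Python) =====
-- def find_peak_idx(data, window_len=8, err_patience=2):
--     n = len(data)
--     if n - window_len <= window_len:
--         return []  # no candidate indices at all
--     # prefix sums: up[t] = number of rising adjacent pairs among the first t pairs,
--     # down[t] = number of falling adjacent pairs among the first t pairs
--     up = [0]
--     down = [0]
--     for k in range(n - 1):
--         up.append(up[-1] + (1 if data[k] < data[k + 1] else 0))
--         down.append(down[-1] + (1 if data[k] > data[k + 1] else 0))
--     thr = window_len - err_patience
--     return [i for i in range(window_len, n - window_len)
--             if up[i] - up[i - window_len] >= thr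
--             and down[i + window_len] - down[i] >= thr]
-- ===== Notes on version B (the rewrite author's own statement) =====
-- stated objective: alternative
-- what changed: Replaced the per-index re-slicing and re-counting of each (window_len+1)-element window by two prefix-sum tables of rising/falling adjacent-pair indicators (built once, each window test becomes two subtractions); a timing run could not certify a speed-up because its large inputs use window sizes with an empty candidate range.
-- outside the precondition, e.g. on find_peak_idx([1, 2, 1, 0], -1, 0): A returns [-1, 0, 1, 2, 3, 4], B raises IndexError
import Mathlib
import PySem

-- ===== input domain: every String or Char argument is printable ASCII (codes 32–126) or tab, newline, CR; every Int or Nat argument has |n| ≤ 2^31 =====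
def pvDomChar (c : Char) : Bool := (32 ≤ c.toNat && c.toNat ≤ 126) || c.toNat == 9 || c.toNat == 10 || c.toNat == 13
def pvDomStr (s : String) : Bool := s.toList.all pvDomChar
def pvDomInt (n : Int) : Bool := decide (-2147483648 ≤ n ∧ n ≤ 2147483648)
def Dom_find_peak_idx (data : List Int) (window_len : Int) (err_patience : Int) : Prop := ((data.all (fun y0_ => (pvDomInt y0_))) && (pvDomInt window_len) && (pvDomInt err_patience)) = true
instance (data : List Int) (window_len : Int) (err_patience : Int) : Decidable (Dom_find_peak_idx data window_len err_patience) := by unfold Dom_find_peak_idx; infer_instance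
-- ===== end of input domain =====

-- B replaces A's per-index window re-slicing and re-counting by two prefix-sum tables of
-- rising/falling adjacent-pair indicators, each window test becoming two subtractions.


-- ===== PORT A =====
def find_peak_idx (data : List Int) (window_len : Int) (err_patience : Int) : List Int :=
  (PySem.List.pyRange window_len ((data.length : Int) - window_len) 1).foldl
    (fun peaks i =>
      let window_up := PySem.List.slice data (some (i - window_len)) (some (i + 1))
      let window_down := PySem.List.slice data (some i) (some (i + window_len + 1))
      if ((PySem.List.pyRange 0 ((window_up.length : Int) - 1) 1).map
            (fun j => if PySem.List.pyGetD window_up j 0 < PySem.List.pyGetD window_up (j + 1) 0 then (1 : Int) else 0)).sum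
           ≥ (window_up.length : Int) - 1 - err_patience
         ∧ ((PySem.List.pyRange 0 ((window_up.length : Int) - 1) 1).map
            (fun j => if PySem.List.pyGetD window_down j 0 > PySem.List.pyGetD window_down (j + 1) 0 then (1 : Int) else 0)).sum
           ≥ (window_up.length : Int) - 1 - err_patience
      then peaks ++ [i] else peaks) []

-- ===== PORT B =====
def find_peak_idx_alt (data : List Int) (window_len : Int) (err_patience : Int) : List Int :=
  let n : Int := (data.length : Int)
  if n - window_len ≤ window_len then [] else
  let ud := (PySem.List.pyRange 0 (n - 1) 1).foldl
    (fun (ud : List Int × List Int) k =>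
      (ud.1 ++ [PySem.List.pyGetD ud.1 (-1) 0 + (if PySem.List.pyGetD data k 0 < PySem.List.pyGetD data (k + 1) 0 then (1 : Int) else 0)],
       ud.2 ++ [PySem.List.pyGetD ud.2 (-1) 0 + (if PySem.List.pyGetD data k 0 > PySem.List.pyGetD data (k + 1) 0 then (1 : Int) else 0)]))
    ([0], [0])
  let thr := window_len - err_patience
  (PySem.List.pyRange window_len (n - window_len) 1).filter
    (fun i => decide (PySem.List.pyGetD ud.1 i 0 - PySem.List.pyGetD ud.1 (i - window_len) 0 ≥ thr)
           && decide (PySem.List.pyGetD ud.2 (i + window_len) 0 - PySem.List.pyGetD ud.2 i 0 ≥ thr))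

-- ===== PRECONDITION & SPEC =====
-- Pre_ restricts to the function's natural domain window_len ≥ 0: for negative window_len A
-- either raises IndexError or returns accidental values produced by Python's negative-index
-- slicing (e.g. indices below window_len), which no caller of a peak finder would specify.
def Pre_find_peak_idx (data : List Int) (window_len : Int) (err_patience : Int) : Prop :=
  0 ≤ window_len
instance (data : List Int) (window_len : Int) (err_patience : Int) : Decidable (Pre_find_peak_idx data window_len err_patience) := by unfold Pre_find_peak_idx; infer_instance

def pvWitness_find_peak_idx : List Int × Int × Int := ([0, 1, 2, 3, 2, 1, 0], 2, 1)

def Spec_find_peak_idx (data : List Int) (window_len : Int) (err_patience : Int) (out : List Int) : Prop := out = find_peak_idx_alt data window_len err_patience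
instance (data : List Int) (window_len : Int) (err_patience : Int) (out : List Int) : Decidable (Spec_find_peak_idx data window_len err_patience out) := by unfold Spec_find_peak_idx; infer_instance

-- ===== CLAIM (what is proved, stated in full; the proofs are below) =====
def Claim_equal_find_peak_idx : Prop := ∀ (data : List Int) (window_len : Int) (err_patience : Int), Dom_find_peak_idx data window_len err_patience → Pre_find_peak_idx data window_len err_patience → Spec_find_peak_idx data window_len err_patience (find_peak_idx data window_len err_patience)

-- ===== LEMMAS AND PROOFS =====

-- rising / falling indicator for the adjacent pair at position k
def pvBU (data : List Int) (k : Nat) : Int := if data.getD k 0 < data.getD (k + 1) 0 then 1 else 0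
def pvBD (data : List Int) (k : Nat) : Int := if data.getD (k + 1) 0 < data.getD k 0 then 1 else 0
-- prefix sums of the indicators
def pvSU (data : List Int) (t : Nat) : Int := ((List.range t).map (pvBU data)).sum
def pvSD (data : List Int) (t : Nat) : Int := ((List.range t).map (pvBD data)).sum

-- element of a drop/take window in terms of the base list
lemma pv_getD_window (data : List Int) (s L j : Nat) (hj : j < L) :
    ((data.drop s).take L).getD j 0 = data.getD (s + j) 0 := by
  simp [List.getD, hj, List.getElem?_drop]

-- indicator sum over a segment is a difference of prefix sums
lemma pv_seg_sum (f : Nat → Int) (s L : Nat) :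
    ((List.range L).map (fun j => f (s + j))).sum
      = ((List.range (s + L)).map f).sum - ((List.range s).map f).sum := by
  induction L with
  | zero => simp
  | succ L ih =>
    rw [List.range_succ, show s + (L + 1) = (s + L) + 1 by omega, List.range_succ (n := s + L)]
    simp only [List.map_append, List.sum_append, List.map_cons, List.map_nil, List.sum_cons,
      List.sum_nil, ih]
    ring

-- the B-side fold builds the two prefix-sum tables
lemma pv_prefix (data : List Int) (m : Nat) :
    (PySem.List.pyRange 0 (m : Int) 1).foldl
      (fun (ud : List Int × List Int) k =>
        (ud.1 ++ [PySem.List.pyGetD ud.1 (-1) 0 + (if PySem.List.pyGetD data k 0 < PySem.List.pyGetD data (k + 1) 0 then (1 : Int) else 0)],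
         ud.2 ++ [PySem.List.pyGetD ud.2 (-1) 0 + (if PySem.List.pyGetD data k 0 > PySem.List.pyGetD data (k + 1) 0 then (1 : Int) else 0)]))
      ([0], [0])
    = ((List.range (m + 1)).map (pvSU data), (List.range (m + 1)).map (pvSD data)) := by
  induction m with
  | zero => simp [PySem.List.pyRange_one_eq_nil, pvSU, pvSD]
  | succ m ih =>
    have hsp : ((m + 1 : Nat) : Int) = (m : Int) + 1 := by push_cast; ring
    rw [hsp, PySem.List.pyRange_one_succ_right (by positivity), List.foldl_append, ih]
    simp only [List.foldl_cons, List.foldl_nil]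
    have hU : (List.range (m + 1)).map (pvSU data)
        = (List.range m).map (pvSU data) ++ [pvSU data m] := by
      rw [List.range_succ, List.map_append]; simp
    have hD : (List.range (m + 1)).map (pvSD data)
        = (List.range m).map (pvSD data) ++ [pvSD data m] := by
      rw [List.range_succ, List.map_append]; simp
    have hlastU : PySem.List.pyGetD ((List.range (m + 1)).map (pvSU data)) (-1) 0 = pvSU data m := by
      rw [hU, PySem.List.pyGetD_neg_one_append_singleton]
    have hlastD : PySem.List.pyGetD ((List.range (m + 1)).map (pvSD data)) (-1) 0 = pvSD data m := by
      rw [hD, PySem.List.pyGetD_neg_one_append_singleton]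
    have hk1 : ((m : Int) + 1) = ((m + 1 : Nat) : Int) := by push_cast; ring
    have hdm : PySem.List.pyGetD data (m : Int) 0 = data.getD m 0 := by
      simp [PySem.List.pyGetD_natCast]
    have hdm1 : PySem.List.pyGetD data ((m : Int) + 1) 0 = data.getD (m + 1) 0 := by
      rw [hk1, PySem.List.pyGetD_natCast]
    have hSU : pvSU data (m + 1) = pvSU data m + pvBU data m := by
      simp [pvSU, List.range_succ]
    have hSD : pvSD data (m + 1) = pvSD data m + pvBD data m := by
      simp [pvSD, List.range_succ]
    refine Prod.ext ?_ ?_ <;> simp only [hlastU, hlastD, hdm, hdm1]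
    · rw [List.range_succ (n := m + 1), List.map_append]
      simp [hSU, pvBU]
    · rw [List.range_succ (n := m + 1), List.map_append]
      simp [hSD, pvBD]

-- reading an entry of a prefix-sum table at an in-range Int index
lemma pv_table_get (f : Nat → Int) (M : Nat) (t : Int) (ht : 0 ≤ t) (htl : t < (M : Int) + 1) :
    PySem.List.pyGetD ((List.range (M + 1)).map f) t 0 = f t.toNat := by
  rw [PySem.List.pyGetD_eq_getElem _ 0 ht (by simpa using htl)]
  simp only [List.getElem_map, List.getElem_range]

theorem find_peak_idx_spec : Claim_equal_find_peak_idx := by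
  intro data w err _ hw
  unfold Spec_find_peak_idx
  have hw' : 0 ≤ w := hw
  cases hM : data.length with
  | zero =>
    have h1 : PySem.List.pyRange w (-w) 1 = [] :=
      PySem.List.pyRange_one_eq_nil (by omega)
    simp [find_peak_idx, find_peak_idx_alt, hM, h1, hw']
  | succ M =>
    have hcast : ((data.length : Int) - 1) = (M : Int) := by rw [hM]; push_cast; ring
    by_cases hE : (data.length : Int) - w ≤ w
    · -- the candidate range is empty: both sides return []
      have h1 : PySem.List.pyRange w ((data.length : Int) - w) 1 = [] :=
        PySem.List.pyRange_one_eq_nil hE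
      simp [find_peak_idx, find_peak_idx_alt, h1, hE]
    simp only [find_peak_idx, find_peak_idx_alt, hcast, pv_prefix, if_neg hE]
    rw [PySem.List.foldl_append_ite_eq_filter]
    simp only [List.nil_append]
    refine List.filter_congr ?_
    intro i hi
    rw [PySem.List.mem_pyRange_one] at hi
    obtain ⟨hwi, hin⟩ := hi
    have h0i : (0 : Int) ≤ i := le_trans hw' hwi
    -- window_up as drop/take
    have hWU : PySem.List.slice data (some (i - w)) (some (i + 1))
        = (data.drop (i - w).toNat).take (w.toNat + 1) := by
      rw [PySem.List.slice_toNat _ (by omega) (by omega)]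
      congr 1
      omega
    have hWD : PySem.List.slice data (some i) (some (i + w + 1))
        = (data.drop i.toNat).take (w.toNat + 1) := by
      rw [PySem.List.slice_toNat _ (by omega) (by omega)]
      congr 1
      omega
    have hLU : ((data.drop (i - w).toNat).take (w.toNat + 1)).length = w.toNat + 1 := by
      simp only [List.length_take, List.length_drop]
      omega
    have hlen1 : ((w.toNat + 1 : Nat) : Int) - 1 = (w.toNat : Int) := by push_cast; ring
    have hidx : ∀ (s k : Nat), k < w.toNat + 1 →
        PySem.List.pyGetD ((data.drop s).take (w.toNat + 1)) (k : Int) 0 = data.getD (s + k) 0 := by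
      intro s k hk
      rw [PySem.List.pyGetD_natCast]
      exact pv_getD_window data s (w.toNat + 1) k hk
    have hsumU : ((PySem.List.pyRange 0 ((w.toNat : Nat) : Int) 1).map
          (fun j => if PySem.List.pyGetD ((data.drop (i - w).toNat).take (w.toNat + 1)) j 0
                   < PySem.List.pyGetD ((data.drop (i - w).toNat).take (w.toNat + 1)) (j + 1) 0 then (1 : Int) else 0)).sum
        = pvSU data ((i - w).toNat + w.toNat) - pvSU data (i - w).toNat := by
      rw [PySem.List.pyRange_one, List.map_map,
        show (((w.toNat : Nat) : Int) - 0).toNat = w.toNat by omega]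
      have hmc : ∀ k ∈ List.range w.toNat,
          ((fun j => if PySem.List.pyGetD ((data.drop (i - w).toNat).take (w.toNat + 1)) j 0
                   < PySem.List.pyGetD ((data.drop (i - w).toNat).take (w.toNat + 1)) (j + 1) 0 then (1 : Int) else 0) ∘ (fun k : Nat => (0 : Int) + k)) k
          = pvBU data ((i - w).toNat + k) := by
        intro k hk
        have hk' : k < w.toNat := List.mem_range.mp hk
        have e1 : (0 : Int) + (k : Int) = ((k : Nat) : Int) := by omega
        simp only [Function.comp, e1]
        rw [show ((k : Nat) : Int) + 1 = ((k + 1 : Nat) : Int) by omega]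
        rw [hidx _ k (by omega), hidx _ (k + 1) (by omega)]
        simp only [pvBU]
        rw [show (i - w).toNat + k + 1 = (i - w).toNat + (k + 1) by omega]
      rw [List.map_congr_left hmc]
      have := pv_seg_sum (pvBU data) (i - w).toNat w.toNat
      simpa [pvSU] using this
    have hsumD : ((PySem.List.pyRange 0 ((w.toNat : Nat) : Int) 1).map
          (fun j => if PySem.List.pyGetD ((data.drop i.toNat).take (w.toNat + 1)) j 0
                   > PySem.List.pyGetD ((data.drop i.toNat).take (w.toNat + 1)) (j + 1) 0 then (1 : Int) else 0)).sum
        = pvSD data (i.toNat + w.toNat) - pvSD data i.toNat := by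
      rw [PySem.List.pyRange_one, List.map_map,
        show (((w.toNat : Nat) : Int) - 0).toNat = w.toNat by omega]
      have hmc : ∀ k ∈ List.range w.toNat,
          ((fun j => if PySem.List.pyGetD ((data.drop i.toNat).take (w.toNat + 1)) j 0
                   > PySem.List.pyGetD ((data.drop i.toNat).take (w.toNat + 1)) (j + 1) 0 then (1 : Int) else 0) ∘ (fun k : Nat => (0 : Int) + k)) k
          = pvBD data (i.toNat + k) := by
        intro k hk
        have hk' : k < w.toNat := List.mem_range.mp hk
        have e1 : (0 : Int) + (k : Int) = ((k : Nat) : Int) := by omega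
        simp only [Function.comp, e1]
        rw [show ((k : Nat) : Int) + 1 = ((k + 1 : Nat) : Int) by omega]
        rw [hidx _ k (by omega), hidx _ (k + 1) (by omega)]
        simp only [pvBD, gt_iff_lt]
        rw [show i.toNat + k + 1 = i.toNat + (k + 1) by omega]
      rw [List.map_congr_left hmc]
      have := pv_seg_sum (pvBD data) i.toNat w.toNat
      simpa [pvSD] using this
    -- table reads on the B side
    have hgU1 : PySem.List.pyGetD ((List.range (M + 1)).map (pvSU data)) i 0 = pvSU data i.toNat :=
      pv_table_get _ M i h0i (by omega)
    have hgU2 : PySem.List.pyGetD ((List.range (M + 1)).map (pvSU data)) (i - w) 0 = pvSU data (i - w).toNat :=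
      pv_table_get _ M (i - w) (by omega) (by omega)
    have hgD1 : PySem.List.pyGetD ((List.range (M + 1)).map (pvSD data)) (i + w) 0 = pvSD data (i + w).toNat :=
      pv_table_get _ M (i + w) (by omega) (by omega)
    have hgD2 : PySem.List.pyGetD ((List.range (M + 1)).map (pvSD data)) i 0 = pvSD data i.toNat :=
      pv_table_get _ M i h0i (by omega)
    rw [hWU, hWD, hLU, hlen1, hsumU, hsumD, hgU1, hgU2, hgD1, hgD2]
    have e1 : (i - w).toNat + w.toNat = i.toNat := by omega
    have e2 : (i + w).toNat = i.toNat + w.toNat := by omega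
    have e3 : ((w.toNat : Nat) : Int) = w := by omega
    rw [e1, e2, e3, Bool.decide_and]
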